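-- pv_equiv track=rewrite | github.com/six6hroun/third-year | Интерпретируемые языки программирования/лаб1/z1.3.py | delitel
-- ===== SOURCE A (Python) =====
-- def delitel (a):
--     max = 1
--     for i in range(1, a+1):
--         if (a % i == 0 and i % 2 == 1):
--             cnt=0
--             for j in range(1, i+1):
--                 if (i % j == 0):
--                     cnt += 1
--             if (cnt != 2):
--                 if (i > max):
--                     max = i
--     return max
-- ===== SOURCE B (Python) =====
-- def _is_prime(n):
--     if n < 2:
--         return False
--     return all(n % j != 0 for j in range(2, n))
--
--
-- def delitel(a):
--     # scan downward and return the first (= largest) odd non-prime divisor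
--     for i in range(a, 0, -1):
--         if a % i == 0 and i % 2 == 1 and not _is_prime(i):
--             return i
--     return 1
-- ===== Notes on version B (the rewrite author's own statement) =====
-- stated objective: alternative
-- what changed: B scans candidates downward and returns at the first (hence largest) odd non-prime divisor instead of keeping a running maximum over a full ascending scan, and tests primality by absence of a proper divisor (all over range(2,n)) instead of counting all divisors and comparing the count with 2.
import Mathlib
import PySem

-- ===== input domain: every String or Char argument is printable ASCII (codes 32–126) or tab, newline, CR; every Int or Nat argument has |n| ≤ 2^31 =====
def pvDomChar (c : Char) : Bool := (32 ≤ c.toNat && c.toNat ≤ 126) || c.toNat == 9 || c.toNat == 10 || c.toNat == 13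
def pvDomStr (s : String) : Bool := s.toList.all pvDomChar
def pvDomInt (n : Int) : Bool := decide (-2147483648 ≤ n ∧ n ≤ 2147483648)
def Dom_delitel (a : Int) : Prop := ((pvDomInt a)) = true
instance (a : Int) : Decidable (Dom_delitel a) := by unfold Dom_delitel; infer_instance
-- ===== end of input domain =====

-- B scans downward and returns the first (largest) odd non-prime divisor, testing
-- primality by absence of a proper divisor instead of counting divisors; same values as A.


-- ===== PORT A =====
def delitel (a : Int) : Int :=
  (PySem.List.pyRange 1 (a + 1) 1).foldl
    (fun mx i =>
      if PySem.Int.mod a i = 0 ∧ PySem.Int.mod i 2 = 1 then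
        let cnt : Int :=
          (PySem.List.pyRange 1 (i + 1) 1).foldl
            (fun c j => if PySem.Int.mod i j = 0 then c + 1 else c) 0
        if cnt ≠ 2 then (if i > mx then i else mx) else mx
      else mx)
    1

-- ===== PORT B =====
def isPrimeB (n : Int) : Bool :=
  if n < 2 then false
  else (PySem.List.pyRange 2 n 1).all (fun j => !(PySem.Int.mod n j == 0))

def altLoop (a : Int) : List Int → Int
  | [] => 1
  | i :: t =>
    if PySem.Int.mod a i = 0 ∧ PySem.Int.mod i 2 = 1 ∧ isPrimeB i = false then i
    else altLoop a t

def delitel_alt (a : Int) : Int :=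
  altLoop a (PySem.List.pyRange a 0 (-1))

-- ===== PRECONDITION & SPEC =====
def Spec_delitel (a : Int) (out : Int) : Prop := out = delitel_alt a
instance (a : Int) (out : Int) : Decidable (Spec_delitel a out) := by unfold Spec_delitel; infer_instance

-- ===== CLAIM (what is proved, stated in full; the proofs are below) =====
def Claim_equal_delitel : Prop := ∀ (a : Int), Dom_delitel a → Spec_delitel a (delitel a)

-- ===== LEMMAS AND PROOFS =====

-- the combined Boolean condition both loops decide for each candidate i
def condB (a i : Int) : Bool :=
  decide (PySem.Int.mod a i = 0) && decide (PySem.Int.mod i 2 = 1) && !isPrimeB i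

-- proof-only: "first element satisfying condB, else 1" on a list
def firstC (a : Int) : List Int → Int
  | [] => 1
  | i :: t => if condB a i then i else firstC a t

lemma altLoop_eq_firstC (a : Int) (l : List Int) : altLoop a l = firstC a l := by
  induction l with
  | nil => rfl
  | cons i t ih =>
    simp only [altLoop, firstC, condB, ih]
    by_cases h1 : PySem.Int.mod a i = 0 <;>
      by_cases h2 : PySem.Int.mod i 2 = 1 <;>
      by_cases h3 : isPrimeB i = false <;>
      simp [h1, h2, h3]

-- A's divisor count of i: (number of j in 1..i with i % j == 0) ≠ 2  ↔  i is not prime (B's test)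
lemma cnt_ne_two_iff (i : Int) (hi : 1 ≤ i) :
    ((PySem.List.pyRange 1 (i + 1) 1).foldl
        (fun c j => if PySem.Int.mod i j = 0 then c + 1 else c) (0 : Int) ≠ 2)
      ↔ isPrimeB i = false := by
  rw [PySem.List.foldl_ite_add_one]
  rcases eq_or_lt_of_le hi with h1 | h2
  · -- i = 1
    subst h1
    decide
  · -- 2 ≤ i
    have hsplit : PySem.List.pyRange 1 (i + 1) 1 = PySem.List.pyRange 1 i 1 ++ [i] :=
      PySem.List.pyRange_one_succ_right hi
    have hcons : PySem.List.pyRange 1 i 1 = 1 :: PySem.List.pyRange 2 i 1 :=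
      PySem.List.pyRange_one_cons h2
    have hm1 : PySem.Int.mod i 1 = 0 := (PySem.Int.mod_eq_zero_iff_dvd i 1).2 (one_dvd i)
    have hmi : PySem.Int.mod i i = 0 := (PySem.Int.mod_eq_zero_iff_dvd i i).2 dvd_rfl
    rw [hsplit, hcons]
    simp only [List.countP_append, List.countP_cons, List.countP_nil, hm1, hmi,
      decide_true, if_pos]
    have hnl : ¬ i < 2 := by omega
    have hall : isPrimeB i = false ↔
        ¬ (∀ j ∈ PySem.List.pyRange 2 i 1, ¬ PySem.Int.mod i j = 0) := by
      simp [isPrimeB, hnl, and_assoc]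
    have hc : (PySem.List.pyRange 2 i 1).countP (fun j => decide (PySem.Int.mod i j = 0)) = 0 ↔
        ∀ j ∈ PySem.List.pyRange 2 i 1, ¬ PySem.Int.mod i j = 0 := by
      simp [List.countP_eq_zero]
    rw [hall, ← hc]
    push_cast
    omega

-- A's running-max step, with the combined condition
def stepC (a : Int) (mx i : Int) : Int :=
  if condB a i then (if i > mx then i else mx) else mx

lemma stepC_le (a b mx i : Int) (hmx : mx ≤ b) (hi : i ≤ b) : stepC a mx i ≤ b := by
  unfold stepC; split_ifs <;> omega

lemma foldl_stepC_le (a : Int) (l : List Int) (b : Int) :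
    ∀ mx, mx ≤ b → (∀ x ∈ l, x ≤ b) → l.foldl (stepC a) mx ≤ b := by
  induction l with
  | nil => intro mx hmx _; simpa using hmx
  | cons i t ih =>
    intro mx hmx hl
    simp only [List.foldl_cons]
    exact ih _ (stepC_le a b mx i hmx (hl i (by simp))) (fun x hx => hl x (by simp [hx]))

-- running max over an ascending list of positives = first hit on the reversed list
lemma foldl_stepC_eq_firstC_reverse (a : Int) :
    ∀ l : List Int, List.Pairwise (· < ·) l → (∀ x ∈ l, 1 ≤ x) →
      l.foldl (stepC a) 1 = firstC a l.reverse := by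
  intro l
  induction l using List.reverseRecOn with
  | nil => intro _ _; rfl
  | append_singleton l' i ih =>
    intro hpw hpos
    have hpw' : List.Pairwise (· < ·) l' := (List.pairwise_append.mp hpw).1
    have hlt : ∀ x ∈ l', x < i := by
      intro x hx
      exact (List.pairwise_append.mp hpw).2.2 x hx i (by simp)
    have hpos' : ∀ x ∈ l', 1 ≤ x := fun x hx => hpos x (by simp [hx])
    have hi1 : 1 ≤ i := hpos i (by simp)
    rw [List.foldl_append, List.reverse_append]
    simp only [List.reverse_singleton, List.singleton_append, firstC]
    by_cases hc : condB a i
    · have hle : l'.foldl (stepC a) 1 ≤ i :=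
        foldl_stepC_le a l' i 1 hi1 (fun x hx => le_of_lt (hlt x hx))
      simp only [List.foldl_cons, List.foldl_nil, stepC, hc, if_true]
      split_ifs with hgt
      · rfl
      · omega
    · simp only [List.foldl_cons, List.foldl_nil, stepC, hc]
      exact ih hpw' hpos'

-- A's fold body equals the condensed stepC on elements of the range
lemma delitel_eq_fold_stepC (a : Int) :
    delitel a = (PySem.List.pyRange 1 (a + 1) 1).foldl (stepC a) 1 := by
  unfold delitel
  apply PySem.List.foldl_congr_mem
  intro mx i hi
  have hi1 : 1 ≤ i := ((PySem.List.mem_pyRange_one).1 hi).1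
  unfold stepC condB
  by_cases h1 : PySem.Int.mod a i = 0 <;>
    by_cases h2 : PySem.Int.mod i 2 = 1
  · by_cases h3 : isPrimeB i = false
    · have hcnt := (cnt_ne_two_iff i hi1).2 h3
      simp only [h1, h2, h3, and_self, if_pos, decide_true, Bool.not_false, Bool.and_true]
      rw [if_pos hcnt]
    · have h3' : isPrimeB i = true := by simpa using h3
      have hcnt : List.foldl (fun c j => if PySem.Int.mod i j = 0 then c + 1 else c) (0 : Int)
          (PySem.List.pyRange 1 (i + 1) 1) = 2 := by
        by_contra hc
        exact h3 ((cnt_ne_two_iff i hi1).1 hc)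
      simp only [h1, h2, h3', and_self, if_pos, decide_true, Bool.not_true, Bool.and_false,
        Bool.false_eq_true]
      rw [if_neg (by simpa using hcnt)]
      simp
  · have h2' : ¬ i % 2 = 1 := by
      rwa [PySem.Int.mod_eq_emod_of_pos (a := i) (b := 2) (by norm_num)] at h2
    have : ¬ (PySem.Int.mod a i = 0 ∧ PySem.Int.mod i 2 = 1) := by tauto
    rw [if_neg this]
    simp [h2']
  · have : ¬ (PySem.Int.mod a i = 0 ∧ PySem.Int.mod i 2 = 1) := by tauto
    rw [if_neg this]
    simp [h1]
  · have : ¬ (PySem.Int.mod a i = 0 ∧ PySem.Int.mod i 2 = 1) := by tauto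
    rw [if_neg this]
    simp [h1]

-- ===== VERDICT (by name: the statement is the Claim_ definition above) =====
theorem delitel_spec : Claim_equal_delitel := by
  intro a _
  unfold Spec_delitel delitel_alt
  rw [altLoop_eq_firstC, PySem.List.pyRange_neg_one_eq_reverse]
  rw [delitel_eq_fold_stepC]
  exact foldl_stepC_eq_firstC_reverse a _
    (PySem.List.pairwise_lt_pyRange_one 1 (a + 1))
    (fun x hx => ((PySem.List.mem_pyRange_one).1 hx).1)
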